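-- pv_equiv track=rewrite | github.com/cirosantilli/project-euler-solutions | solvers/803.py | solve_y0_for_residues
-- ===== SOURCE A (Python) =====
-- A = 25214903917
--
-- MOD24 = 1 << 24
--
-- MASK24 = MOD24 - 1
--
-- def solve_y0_for_residues(carries24, residues13):
--     """
--     Given:
--       y_{n+1} = (A*y_n + carries24[n]) mod 2^24
--       y_n mod 13 must equal residues13[n]
--     Return all y0 in [0, 2^24) satisfying the constraints.
--     Strategy: enumerate y0 = r0 + 13*k and prefilter using y1,y2 residues.
--     """
--     L = len(residues13)
--     if L == 0:
--         return []
--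
--     r0 = residues13[0]
--
--     if L == 1:
--         # Any y0 with correct residue works
--         return list(range(r0, MOD24, 13))
--
--     r1 = residues13[1]
--     if L == 2:
--         sols = []
--         y0 = r0
--         y1 = (A * y0 + carries24[0]) & MASK24
--         delta1 = (13 * (A & MASK24)) & MASK24  # if y0 += 13 then y1 += 13*A mod 2^24
--         for y0 in range(r0, MOD24, 13):
--             if (y1 % 13) == r1:
--                 sols.append(y0)
--             y1 = (y1 + delta1) & MASK24
--         return sols
--
--     # L >= 3: precheck y1 and y2 (fast, keeps scan light)
--     r2 = residues13[2]
--
--     y0 = r0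
--     y1 = (A * y0 + carries24[0]) & MASK24
--     y2 = (A * y1 + carries24[1]) & MASK24
--
--     a24 = A & MASK24
--     delta1 = (13 * a24) & MASK24
--     delta2 = (delta1 * a24) & MASK24  # 13*A^2 mod 2^24
--
--     sols = []
--     for y0 in range(r0, MOD24, 13):
--         if (y1 % 13) == r1 and (y2 % 13) == r2:
--             # full verify from y2 onward
--             y = y2
--             ok = True
--             for i in range(2, L - 1):
--                 y = (A * y + carries24[i]) & MASK24
--                 if (y % 13) != residues13[i + 1]:
--                     ok = False
--                     break
--             if ok:
--                 sols.append(y0)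
--
--         y1 = (y1 + delta1) & MASK24
--         y2 = (y2 + delta2) & MASK24
--
--     return sols
-- ===== SOURCE B (Python) =====
-- A = 25214903917
--
-- MOD24 = 1 << 24
--
-- MASK24 = MOD24 - 1
--
-- def solve_y0_for_residues(carries24, residues13):
--     """Brute-force verifier: for each candidate y0 = residues13[0] + 13*k,
--     recompute the whole LCG chain from scratch and keep y0 iff every
--     iterate hits its required residue."""
--     L = len(residues13)
--     if L == 0:
--         return []
--     sols = []
--     for y0 in range(residues13[0], MOD24, 13):
--         y = y0
--         ok = True
--         for n in range(1, L):
--             y = (A * y + carries24[n - 1]) & MASK24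
--             if y % 13 != residues13[n]:
--                 ok = False
--                 break
--         if ok:
--             sols.append(y0)
--     return sols
-- ===== Notes on version B (the rewrite author's own statement) =====
-- stated objective: simpler
-- what changed: B replaces A's three special cases (L==1 / L==2 / L>=3) with a single uniform brute-force loop that recomputes each candidate's whole LCG chain from scratch, dropping the incremental delta1/delta2 state and the y1/y2 prefilter.
-- outside the precondition, e.g. on solve_y0_for_residues([0, 0], [16777216, 0, 0, 0, 0]): A returns [], B returns []
import Mathlib
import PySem

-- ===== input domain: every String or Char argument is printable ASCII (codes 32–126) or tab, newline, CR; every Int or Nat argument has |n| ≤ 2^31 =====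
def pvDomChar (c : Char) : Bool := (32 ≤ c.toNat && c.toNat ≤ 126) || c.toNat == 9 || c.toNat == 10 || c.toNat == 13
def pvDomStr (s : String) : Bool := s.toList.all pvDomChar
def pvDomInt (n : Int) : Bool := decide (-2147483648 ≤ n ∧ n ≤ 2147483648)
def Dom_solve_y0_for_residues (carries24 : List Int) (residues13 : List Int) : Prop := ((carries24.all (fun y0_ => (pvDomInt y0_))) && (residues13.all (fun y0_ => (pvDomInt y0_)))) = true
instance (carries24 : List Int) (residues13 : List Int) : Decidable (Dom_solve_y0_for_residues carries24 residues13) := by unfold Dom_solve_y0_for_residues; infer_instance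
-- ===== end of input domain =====

-- B replaces A's three special cases and incremental y1/y2 prefilter state by one uniform
-- brute-force loop that rechecks each candidate's whole chain from scratch (simpler; not faster).


-- ===== PORT A =====
def pvA : Int := 25214903917
def pvMOD24 : Int := 16777216
def pvMASK24 : Int := 16777215

-- A's inner full-verify loop: `for i in range(2, L-1): y = (A*y+carries24[i]) & MASK24;
-- if y % 13 != residues13[i+1]: ok = False; break` — returned Bool is `ok`.
def pvVerifyA (carries24 : List Int) (residues13 : List Int) : Int → List Int → Bool
  | _, [] => true
  | y, i :: is =>
    let y' := PySem.Int.band (pvA * y + PySem.List.pyGetD carries24 i 0) pvMASK24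
    if PySem.Int.mod y' 13 ≠ PySem.List.pyGetD residues13 (i + 1) 0 then false
    else pvVerifyA carries24 residues13 y' is

-- Literal port of A.  Indexing carries24[i]/residues13[i] is PySem.List.pyGetD _ _ 0: Python
-- raises where pyGetD would take the default, and exactly those inputs are outside Pre_ below.
-- `x & MASK24` is ported as PySem.Int.band x pvMASK24 (Python-exact, also on negative x).
def solve_y0_for_residues (carries24 : List Int) (residues13 : List Int) : List Int :=
  let L : Int := PySem.List.len residues13
  if L = 0 then []
  else
    let r0 := PySem.List.pyGetD residues13 0 0
    if L = 1 then PySem.List.pyRange r0 pvMOD24 13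
    else
      let r1 := PySem.List.pyGetD residues13 1 0
      if L = 2 then
        let y1 := PySem.Int.band (pvA * r0 + PySem.List.pyGetD carries24 0 0) pvMASK24
        let delta1 := PySem.Int.band (13 * PySem.Int.band pvA pvMASK24) pvMASK24
        ((PySem.List.pyRange r0 pvMOD24 13).foldl
          (fun (st : List Int × Int) y0 =>
            ((if PySem.Int.mod st.2 13 = r1 then st.1 ++ [y0] else st.1),
             PySem.Int.band (st.2 + delta1) pvMASK24))
          ([], y1)).1
      else
        let r2 := PySem.List.pyGetD residues13 2 0
        let y1 := PySem.Int.band (pvA * r0 + PySem.List.pyGetD carries24 0 0) pvMASK24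
        let y2 := PySem.Int.band (pvA * y1 + PySem.List.pyGetD carries24 1 0) pvMASK24
        let a24 := PySem.Int.band pvA pvMASK24
        let delta1 := PySem.Int.band (13 * a24) pvMASK24
        let delta2 := PySem.Int.band (delta1 * a24) pvMASK24
        ((PySem.List.pyRange r0 pvMOD24 13).foldl
          (fun (st : List Int × Int × Int) y0 =>
            ((if PySem.Int.mod st.2.1 13 = r1 ∧ PySem.Int.mod st.2.2 13 = r2 then
                (if pvVerifyA carries24 residues13 st.2.2 (PySem.List.pyRange 2 (L - 1) 1) then
                  st.1 ++ [y0] else st.1)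
              else st.1),
             PySem.Int.band (st.2.1 + delta1) pvMASK24,
             PySem.Int.band (st.2.2 + delta2) pvMASK24))
          ([], y1, y2)).1

-- ===== PORT B =====
-- B's inner chain check: `for n in range(1, L): y = (A*y+carries24[n-1]) & MASK24;
-- if y % 13 != residues13[n]: ok = False; break` — returned Bool is `ok`.
def pvChainB (carries24 : List Int) (residues13 : List Int) : Int → List Int → Bool
  | _, [] => true
  | y, n :: ns =>
    let y' := PySem.Int.band (pvA * y + PySem.List.pyGetD carries24 (n - 1) 0) pvMASK24
    if PySem.Int.mod y' 13 ≠ PySem.List.pyGetD residues13 n 0 then false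
    else pvChainB carries24 residues13 y' ns

def solve_y0_for_residues_alt (carries24 : List Int) (residues13 : List Int) : List Int :=
  let L : Int := PySem.List.len residues13
  if L = 0 then []
  else
    (PySem.List.pyRange (PySem.List.pyGetD residues13 0 0) pvMOD24 13).foldl
      (fun sols y0 =>
        if pvChainB carries24 residues13 y0 (PySem.List.pyRange 1 L 1) then sols ++ [y0] else sols)
      []

-- ===== PRECONDITION & SPEC =====
-- Pre_ excludes the inputs on which Python A raises IndexError on carries24 (carries24 too short
-- for the residue chain).  For len(residues13) ≥ 3 the exact raise set is data-dependent
-- (carries24[i] for i ≥ 2 is read only when the y1/y2 prefilter fires for some candidate), so the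
-- carries24-length disjunct is conservative and also excludes some inputs on which A returns
-- (see cites); the residue-out-of-range disjunct keeps the common such inputs inside Pre_.
def Pre_solve_y0_for_residues (carries24 : List Int) (residues13 : List Int) : Prop :=
  residues13.length ≤ 1 ∨
  (residues13.length = 2 ∧ 1 ≤ carries24.length) ∨
  (3 ≤ residues13.length ∧
    (residues13.length - 1 ≤ carries24.length ∨
     (2 ≤ carries24.length ∧
       (¬ (0 ≤ PySem.List.pyGetD residues13 1 0 ∧ PySem.List.pyGetD residues13 1 0 < 13) ∨
        ¬ (0 ≤ PySem.List.pyGetD residues13 2 0 ∧ PySem.List.pyGetD residues13 2 0 < 13)))))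
instance (carries24 : List Int) (residues13 : List Int) : Decidable (Pre_solve_y0_for_residues carries24 residues13) := by unfold Pre_solve_y0_for_residues; infer_instance

def pvWitness_solve_y0_for_residues : List Int × List Int := ([], [])

def Spec_solve_y0_for_residues (carries24 : List Int) (residues13 : List Int) (out : List Int) : Prop := out = solve_y0_for_residues_alt carries24 residues13
instance (carries24 : List Int) (residues13 : List Int) (out : List Int) : Decidable (Spec_solve_y0_for_residues carries24 residues13 out) := by unfold Spec_solve_y0_for_residues; infer_instance

-- ===== CLAIM (what is proved, stated in full; the proofs are below) =====
def Claim_equal_solve_y0_for_residues : Prop := ∀ (carries24 : List Int) (residues13 : List Int), Dom_solve_y0_for_residues carries24 residues13 → Pre_solve_y0_for_residues carries24 residues13 → Spec_solve_y0_for_residues carries24 residues13 (solve_y0_for_residues carries24 residues13)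

-- ===== LEMMAS AND PROOFS =====

-- `x & 0xFFFFFF` is `x mod 2^24`, for every integer x (Python's & on infinite two's complement).
theorem pv_band_mask (x : Int) : PySem.Int.band x pvMASK24 = x % pvMOD24 := by
  simp only [PySem.Int.band, pvMASK24, pvMOD24]
  norm_num
  rw [show Int.toNat 16777215 = 16777215 from rfl]
  split
  · next h =>
    have h1 : x.toNat &&& 16777215 = x.toNat % 16777216 := by
      have := Nat.and_two_pow_sub_one_eq_mod x.toNat 24
      norm_num at this; exact this
    rw [h1]; omega
  · next h =>
    have h1 : 16777215 &&& ((-x).toNat - 1) = ((-x).toNat - 1) % 16777216 := by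
      have := Nat.and_two_pow_sub_one_eq_mod ((-x).toNat - 1) 24
      norm_num at this; rw [Nat.and_comm]; exact this
    rw [h1]; omega

-- one incremental step of A's y1 equals recomputing the first chain value at y+13
theorem pv_step (c0 d : Int) (hd : d % pvMOD24 = (13 * pvA) % pvMOD24) (y : Int) :
    PySem.Int.band (PySem.Int.band (pvA * y + c0) pvMASK24 + d) pvMASK24
      = PySem.Int.band (pvA * (y + 13) + c0) pvMASK24 := by
  rw [pv_band_mask, pv_band_mask, pv_band_mask]
  simp only [pvA, pvMOD24] at *
  omega

-- one incremental step of A's y2 equals recomputing the second chain value at y+13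
theorem pv_step2 (c0 c1 d : Int) (hd : d % pvMOD24 = (13 * pvA * pvA) % pvMOD24) (y : Int) :
    PySem.Int.band
        (PySem.Int.band (pvA * PySem.Int.band (pvA * y + c0) pvMASK24 + c1) pvMASK24 + d) pvMASK24
      = PySem.Int.band (pvA * PySem.Int.band (pvA * (y + 13) + c0) pvMASK24 + c1) pvMASK24 := by
  rw [pv_band_mask, pv_band_mask, pv_band_mask, pv_band_mask, pv_band_mask]
  simp only [pvA, pvMOD24] at *
  omega

-- A's delta constants are congruent to 13*A and 13*A^2 mod 2^24
theorem pv_delta1_mod :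
    (PySem.Int.band (13 * PySem.Int.band pvA pvMASK24) pvMASK24) % pvMOD24 = (13 * pvA) % pvMOD24 := by
  decide

theorem pv_delta2_mod :
    (PySem.Int.band (PySem.Int.band (13 * PySem.Int.band pvA pvMASK24) pvMASK24 * PySem.Int.band pvA pvMASK24) pvMASK24) % pvMOD24
      = (13 * pvA * pvA) % pvMOD24 := by
  decide

-- generic shape of A's scan: the state is updated candidate-independently, the accumulator step
-- depends only on the current state; the state stays in lock-step with the current candidate.
theorem pv_foldl_det {a : Type} (upd : a -> a) (cond : a -> List Int -> Int -> List Int)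
    (h : Int -> a) (hcomm : forall y, upd (h y) = h (y + 13)) (r0 : Int) (n : Nat) :
    ((List.range n).map (fun (k : Nat) => r0 + 13 * (k : Int))).foldl
        (fun st y0 => (cond st.2 st.1 y0, upd st.2)) (([] : List Int), h r0)
      = (((List.range n).map (fun (k : Nat) => r0 + 13 * (k : Int))).foldl
           (fun sols y0 => cond (h y0) sols y0) [],
         h (r0 + 13 * (n : Int))) := by
  induction n with
  | zero => simp
  | succ n ih =>
    rw [List.range_succ, List.map_append, List.foldl_append, List.foldl_append, ih]
    simp only [List.map_cons, List.map_nil, List.foldl_cons, List.foldl_nil]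
    refine Prod.ext rfl ?_
    simp only [hcomm]
    congr 1
    push_cast
    ring

-- A's verify loop over indices [i, j) equals B's chain loop over indices [i+1, j+1)
theorem pv_verify_shift (c r : List Int) (k : Nat) :
    forall (i j y : Int), (j - i).toNat <= k ->
      pvVerifyA c r y (PySem.List.pyRange i j 1) = pvChainB c r y (PySem.List.pyRange (i + 1) (j + 1) 1) := by
  induction k with
  | zero =>
    intro i j y hk
    rw [PySem.List.pyRange_one_eq_nil (by omega), PySem.List.pyRange_one_eq_nil (by omega)]
    rfl
  | succ k ih =>
    intro i j y hk
    by_cases hij : i < j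
    · rw [PySem.List.pyRange_one_cons hij, PySem.List.pyRange_one_cons (by omega : i + 1 < j + 1)]
      simp only [pvVerifyA, pvChainB, add_sub_cancel_right]
      by_cases hc : PySem.Int.mod (PySem.Int.band (pvA * y + PySem.List.pyGetD c i 0) pvMASK24) 13
          = PySem.List.pyGetD r (i + 1) 0
      · simp only [hc, ne_eq, not_true_eq_false, if_false]
        exact ih (i + 1) j _ (by omega)
      · simp only [hc, ne_eq, not_false_eq_true, if_true]
    · rw [PySem.List.pyRange_one_eq_nil (by omega), PySem.List.pyRange_one_eq_nil (by omega)]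
      rfl

-- ===== VERDICT (by name: the statement is the Claim_ definition above) =====
theorem solve_y0_for_residues_spec : Claim_equal_solve_y0_for_residues := by
  intro c r _ _
  unfold Spec_solve_y0_for_residues
  unfold solve_y0_for_residues solve_y0_for_residues_alt
  simp only [PySem.List.len_eq]
  by_cases h0 : r.length = 0
  · simp [h0]
  by_cases h1 : r.length = 1
  · -- L = 1: A returns the whole range; B's chain check is vacuously true
    simp only [h1]
    norm_num
    rw [show (fun (sols : List Int) (y0 : Int) => if pvChainB c r y0 [] = true then sols ++ [y0] else sols)
          = (fun sols y0 => sols ++ [y0]) from funext fun sols => funext fun y0 => by simp [pvChainB]]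
    rw [PySem.List.foldl_append_singleton]
    simp
  by_cases h2 : r.length = 2
  · -- L = 2: A's incremental y1 scan vs B's per-candidate chain of length 1
    simp only [h2]
    norm_num
    rw [PySem.List.pyRange_of_pos (PySem.List.pyGetD r 0 0) pvMOD24 (by norm_num : (0 : Int) < 13)]
    have hfold := pv_foldl_det
      (fun y1 => PySem.Int.band (y1 + PySem.Int.band (13 * PySem.Int.band pvA pvMASK24) pvMASK24) pvMASK24)
      (fun y1 sols y0 => if y1 % 13 = PySem.List.pyGetD r 1 0 then sols ++ [y0] else sols)
      (fun y => PySem.Int.band (pvA * y + PySem.List.pyGetD c 0 0) pvMASK24)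
      (fun y => pv_step (PySem.List.pyGetD c 0 0) _ pv_delta1_mod y)
      (PySem.List.pyGetD r 0 0)
      (if PySem.List.pyGetD r 0 0 < pvMOD24 then ((pvMOD24 - PySem.List.pyGetD r 0 0 + 13 - 1) / 13).toNat else 0)
    refine (congrArg Prod.fst hfold).trans ?_
    refine List.foldl_ext _ _ [] ?_
    intro sols y0 _
    rw [PySem.List.pyRange_one_cons (by norm_num : (1 : Int) < 2),
        PySem.List.pyRange_one_eq_nil (by norm_num : (2 : Int) ≤ 1 + 1)]
    simp only [pvChainB]
    norm_num
  · -- L ≥ 3: A's incremental (y1, y2) prefilter plus verify loop vs B's full chain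
    have h3 : 3 ≤ r.length := by omega
    have e0 : (((r.length : Int)) = 0) = False := eq_false (by omega)
    have e1 : (((r.length : Int)) = 1) = False := eq_false (by omega)
    have e2 : (((r.length : Int)) = 2) = False := eq_false (by omega)
    simp only [e0, e1, e2, if_false]
    rw [PySem.List.pyRange_of_pos (PySem.List.pyGetD r 0 0) pvMOD24 (by norm_num : (0 : Int) < 13)]
    have hfold := pv_foldl_det
      (fun st2 : Int × Int =>
        (PySem.Int.band (st2.1 + PySem.Int.band (13 * PySem.Int.band pvA pvMASK24) pvMASK24) pvMASK24,
         PySem.Int.band (st2.2 + PySem.Int.band (PySem.Int.band (13 * PySem.Int.band pvA pvMASK24) pvMASK24 * PySem.Int.band pvA pvMASK24) pvMASK24) pvMASK24))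
      (fun st2 sols y0 =>
        if PySem.Int.mod st2.1 13 = PySem.List.pyGetD r 1 0 ∧ PySem.Int.mod st2.2 13 = PySem.List.pyGetD r 2 0 then
          (if pvVerifyA c r st2.2 (PySem.List.pyRange 2 ((r.length : Int) - 1) 1) then sols ++ [y0] else sols)
        else sols)
      (fun y =>
        (PySem.Int.band (pvA * y + PySem.List.pyGetD c 0 0) pvMASK24,
         PySem.Int.band (pvA * PySem.Int.band (pvA * y + PySem.List.pyGetD c 0 0) pvMASK24 + PySem.List.pyGetD c 1 0) pvMASK24))
      (fun y => by
        refine Prod.ext ?_ ?_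
        · exact pv_step (PySem.List.pyGetD c 0 0) _ pv_delta1_mod y
        · exact pv_step2 (PySem.List.pyGetD c 0 0) (PySem.List.pyGetD c 1 0) _ pv_delta2_mod y)
      (PySem.List.pyGetD r 0 0)
      (if PySem.List.pyGetD r 0 0 < pvMOD24 then ((pvMOD24 - PySem.List.pyGetD r 0 0 + 13 - 1) / 13).toNat else 0)
    refine (congrArg Prod.fst hfold).trans ?_
    refine List.foldl_ext _ _ [] ?_
    intro sols y0 _
    have hBr : PySem.List.pyRange 1 (r.length : Int) 1 = 1 :: 2 :: PySem.List.pyRange 3 (r.length : Int) 1 := by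
      rw [PySem.List.pyRange_one_cons (by omega), PySem.List.pyRange_one_cons (by omega)]
      norm_num
    simp only [hBr]
    simp only [pvChainB]
    norm_num
    by_cases hm1 : (PySem.Int.band (pvA * y0 + PySem.List.pyGetD c 0 0) pvMASK24) % 13
        = PySem.List.pyGetD r 1 0
    · by_cases hm2 :
          (PySem.Int.band (pvA * PySem.Int.band (pvA * y0 + PySem.List.pyGetD c 0 0) pvMASK24 + PySem.List.pyGetD c 1 0) pvMASK24) % 13
          = PySem.List.pyGetD r 2 0
      · simp only [hm1, hm2, and_self, if_true]
        rw [pv_verify_shift c r ((r.length : Int) - 1 - 2).toNat 2 ((r.length : Int) - 1)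
              (PySem.Int.band (pvA * PySem.Int.band (pvA * y0 + PySem.List.pyGetD c 0 0) pvMASK24 + PySem.List.pyGetD c 1 0) pvMASK24)
              (le_refl _)]
        rw [show ((r.length : Int) - 1 + 1) = (r.length : Int) by ring]
        norm_num
      · simp [hm1, hm2]
    · simp [hm1]
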